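-- pv_equiv track=rewrite | github.com/kube-security/orca | orca/lib/path.py | remove_folders
-- ===== SOURCE A (Python) =====
-- def remove_folders(paths):
--     dir_set = set()
--     result = []
--
--     for path in paths:
--         parts = path.split("/")
--         for i in range(1, len(parts)):
--             dir_set.add("/".join(parts[:i]))
--
--     for path in paths:
--         if path not in dir_set and len(path) > 2:
--             result.append(path)
--
--     return result
-- ===== SOURCE B (Python) =====
-- def remove_folders(paths):
--     return [p for p in paths
--             if len(p) > 2 and not any(q.startswith(p + "/") for q in paths)]
-- ===== Notes on version B (the rewrite author's own statement) =====
-- stated objective: simpler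
-- what changed: Drops A's two-phase 'build a set of all ancestor prefixes, then membership-test' in favour of a single filter that keeps a path iff it is longer than 2 and no path in the list starts with it plus '/'.
import Mathlib
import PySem

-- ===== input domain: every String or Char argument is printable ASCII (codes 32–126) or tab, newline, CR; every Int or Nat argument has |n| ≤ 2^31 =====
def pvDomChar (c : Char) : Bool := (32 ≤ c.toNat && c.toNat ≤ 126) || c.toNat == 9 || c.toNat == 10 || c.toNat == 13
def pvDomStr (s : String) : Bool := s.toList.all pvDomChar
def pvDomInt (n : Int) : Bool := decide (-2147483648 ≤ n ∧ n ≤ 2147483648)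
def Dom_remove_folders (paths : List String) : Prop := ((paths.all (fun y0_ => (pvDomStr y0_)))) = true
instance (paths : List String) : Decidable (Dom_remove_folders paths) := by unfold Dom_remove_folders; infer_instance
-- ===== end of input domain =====

-- B replaces A's two-phase "collect every ancestor prefix into a set, then membership-test"
-- by a single filter testing `any(q.startswith(path + '/') for q in paths)`; objective: simpler.

-- ===== PORT A =====
-- path.split("/"): sep "/" is nonempty, so PySem.Str.split? is always `some`; getD [] is never taken.
def pvPartsA (path : String) : List String := (PySem.Str.split? path "/").getD []

def remove_folders (paths : List String) : List String :=
  let dir_set : PySem.Set String :=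
    paths.foldl (fun ds path =>
      let parts := pvPartsA path
      (PySem.List.pyRange 1 (parts.length : Int) 1).foldl
        (fun ds i => PySem.Set.add ds (PySem.Str.join "/" (PySem.List.slice parts none (some i)))) ds)
      PySem.Set.empty
  paths.foldl (fun result path =>
    if !(PySem.Set.contains dir_set path) && decide ((2 : Int) < PySem.Str.len path)
    then result ++ [path] else result) []

-- ===== PORT B =====
def remove_folders_alt (paths : List String) : List String :=
  paths.filter (fun p =>
    decide ((2 : Int) < PySem.Str.len p) &&
      !(paths.any (fun q => PySem.Str.startswith q (p ++ "/"))))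

-- ===== PRECONDITION & SPEC =====
def Spec_remove_folders (paths : List String) (out : List String) : Prop := out = remove_folders_alt paths
instance (paths : List String) (out : List String) : Decidable (Spec_remove_folders paths out) := by unfold Spec_remove_folders; infer_instance

-- ===== CLAIM (what is proved, stated in full; the proofs are below) =====
def Claim_equal_remove_folders : Prop := ∀ (paths : List String), Dom_remove_folders paths → Spec_remove_folders paths (remove_folders paths)

-- ===== LEMMAS AND PROOFS =====
def pvSp (c : Char) : List Char → List (List Char)
  | [] => [[]]
  | a :: rest => if a = c then [] :: pvSp c rest else (pvSp c rest).modifyHead (a :: ·)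

theorem pvSp_ne_nil (c : Char) (l : List Char) : pvSp c l ≠ [] := by
  induction l with
  | nil => simp [pvSp]
  | cons a rest ih =>
    simp only [pvSp]
    split
    · simp
    · simp [List.modifyHead_eq_nil_iff, ih]

theorem pvModifyHead_id (l : List (List Char)) : l.modifyHead (fun x => x) = l := by
  cases l <;> rfl

theorem pvSp_go (c : Char) (l : List Char) : ∀ (fuel : Nat), l.length ≤ fuel →
    ∀ (cur : List Char) (acc : List (List Char)),
    PySem.Chars.splitOn.go [c] fuel l cur acc
      = acc.reverse ++ (pvSp c l).modifyHead (cur.reverse ++ ·) := by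
  induction l with
  | nil =>
    intro fuel _ cur acc
    cases fuel <;> simp [PySem.Chars.splitOn.go, pvSp]
  | cons a rest ih =>
    intro fuel hf cur acc
    cases fuel with
    | zero => simp at hf
    | succ f =>
      simp only [PySem.Chars.splitOn.go]
      by_cases hc : a = c
      · subst hc
        rw [if_pos (by simp [List.isPrefixOf])]
        rw [show List.drop [a].length (a :: rest) = rest from rfl]
        rw [ih f (by simpa using hf) [] (cur.reverse :: acc)]
        simp [pvSp, pvModifyHead_id]
      · rw [if_neg (by simp [List.isPrefixOf, Ne.symm hc])]
        rw [ih f (by simpa using hf) (a :: cur) acc]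
        simp only [pvSp, if_neg hc]
        rw [List.modifyHead_modifyHead]
        simp [Function.comp_def]

theorem pvSplitOn_eq (c : Char) (l : List Char) : PySem.Chars.splitOn l [c] = pvSp c l := by
  unfold PySem.Chars.splitOn
  rw [pvSp_go c l (l.length + 1) (by omega) [] []]
  simp [pvModifyHead_id]

theorem pvSp_not_mem (c : Char) (l : List Char) : ∀ u ∈ pvSp c l, c ∉ u := by
  induction l with
  | nil => simp [pvSp]
  | cons a rest ih =>
    simp only [pvSp]
    split
    · simpa using ih
    · rename_i hc
      intro u hu
      rcases h : (pvSp c rest) with _ | ⟨h0, t0⟩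
      · exact absurd h (pvSp_ne_nil c rest)
      · rw [h, List.modifyHead_cons] at hu
        rcases List.mem_cons.mp hu with h' | h'
        · subst h'
          have := ih h0 (by rw [h]; simp)
          simp [this, Ne.symm hc]
        · exact ih u (by rw [h]; simp [h'])

theorem pvSp_join (c : Char) (l : List Char) : PySem.Chars.join [c] (pvSp c l) = l := by
  induction l with
  | nil => simp [pvSp, PySem.Chars.join_singleton]
  | cons a rest ih =>
    simp only [pvSp]
    split
    · rename_i hc
      subst hc
      rcases h : pvSp a rest with _ | ⟨h0, t0⟩
      · exact absurd h (pvSp_ne_nil a rest)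
      · rw [h] at ih
        rw [PySem.Chars.join_cons_cons, ih]
        simp
    · rename_i hc
      rcases h : pvSp c rest with _ | ⟨h0, t0⟩
      · exact absurd h (pvSp_ne_nil c rest)
      · rw [h] at ih
        simp only [List.modifyHead]
        rcases t0 with _ | ⟨p, t1⟩
        · rw [PySem.Chars.join_singleton]
          rw [PySem.Chars.join_singleton] at ih
          simp [ih]
        · rw [PySem.Chars.join_cons_cons]
          rw [PySem.Chars.join_cons_cons] at ih
          simp [List.append_assoc] at ih ⊢
          exact ih


theorem pvJoin_cons (c : Char) (u : List Char) (l : List (List Char)) (h : l ≠ []) :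
    PySem.Chars.join [c] (u :: l) = u ++ [c] ++ PySem.Chars.join [c] l := by
  cases l with
  | nil => exact absurd rfl h
  | cons v rest => exact PySem.Chars.join_cons_cons [c] u v rest

theorem pvMain (c : Char) (ps : List (List Char)) (hne : ps ≠ []) (hfree : ∀ u ∈ ps, c ∉ u)
    (s : List Char) :
    (∃ i : Nat, 1 ≤ i ∧ i < ps.length ∧ s = PySem.Chars.join [c] (ps.take i))
      ↔ (s ++ [c]) <+: PySem.Chars.join [c] ps := by
  induction ps generalizing s with
  | nil => exact absurd rfl hne
  | cons u ps' ih =>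
    by_cases hps' : ps' = []
    · subst hps'
      simp only [List.length_cons, List.length_nil]
      constructor
      · rintro ⟨i, h1, h2, _⟩; omega
      · intro h
        rw [PySem.Chars.join_singleton] at h
        have : c ∈ u := List.IsPrefix.mem (by simp) h
        exact absurd this (hfree u (by simp))
    · have hJ : PySem.Chars.join [c] (u :: ps') = u ++ [c] ++ PySem.Chars.join [c] ps' :=
        pvJoin_cons c u ps' hps'
      have hfree' : ∀ v ∈ ps', c ∉ v := fun v hv => hfree v (by simp [hv])
      have ihs := ih hps' hfree'
      constructor
      · rintro ⟨i, h1, h2, rfl⟩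
        rcases Nat.lt_or_ge i 2 with hi | hi
        · have : i = 1 := by omega
          subst this
          simp only [List.take_succ_cons, List.take_zero, PySem.Chars.join_singleton]
          rw [hJ]
          exact ⟨PySem.Chars.join [c] ps', by simp⟩
        · have h2' : i - 1 < ps'.length := by simp at h2; omega
          have htne : ps'.take (i - 1) ≠ [] := by
            intro hnil
            rcases List.take_eq_nil_iff.mp hnil with h | h
            · omega
            · exact hps' h
          have hstep : (u :: ps').take i = u :: ps'.take (i - 1) := by
            cases i with
            | zero => omega
            | succ n => simp [List.take_succ_cons]
          rw [hstep, pvJoin_cons c u _ htne, hJ]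
          have hp : PySem.Chars.join [c] (ps'.take (i - 1)) ++ [c] <+: PySem.Chars.join [c] ps' :=
            (ihs _).mp ⟨i - 1, by omega, h2', rfl⟩
          obtain ⟨t, ht⟩ := hp
          exact ⟨t, by simp [← ht]⟩
      · intro h
        rw [hJ] at h
        have hu : u ++ [c] <+: u ++ [c] ++ PySem.Chars.join [c] ps' := by simp
        rcases List.prefix_or_prefix_of_prefix h hu with hcase | hcase
        · -- s ++ [c] <+: u ++ [c]
          obtain ⟨t, ht⟩ := hcase
          rcases t.eq_nil_or_concat with rfl | ⟨t₀, x, rfl⟩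
          · simp only [List.append_nil] at ht
            obtain ⟨rfl, -⟩ := List.append_singleton_inj.mp ht
            refine ⟨1, le_refl 1, by simp [List.length_pos_iff.mpr hps'], by simp⟩
          · rw [List.concat_eq_append] at ht
            rw [show s ++ [c] ++ (t₀ ++ [x]) = (s ++ c :: t₀) ++ [x] by simp] at ht
            obtain ⟨hu', rfl⟩ := List.append_singleton_inj.mp ht
            exact absurd (by rw [← hu']; simp : x ∈ u) (hfree u (by simp))
        · -- u ++ [c] <+: s ++ [c]
          obtain ⟨t, ht⟩ := hcase
          rcases t.eq_nil_or_concat with rfl | ⟨t₀, x, rfl⟩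
          · simp only [List.append_nil] at ht
            obtain ⟨rfl, -⟩ := List.append_singleton_inj.mp ht
            refine ⟨1, le_refl 1, by simp [List.length_pos_iff.mpr hps'], by simp⟩
          · rw [List.concat_eq_append] at ht
            have hs : s = u ++ c :: t₀ := by
              have : (u ++ c :: t₀) ++ [x] = s ++ [c] := by rw [← ht]; simp
              obtain ⟨h', rfl⟩ := List.append_singleton_inj.mp this
              exact h'.symm
            have hxc : x = c := by
              have : (u ++ c :: t₀) ++ [x] = s ++ [c] := by rw [← ht]; simp
              exact (List.append_singleton_inj.mp this).2
            rw [hxc] at ht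
            have htpre : t₀ ++ [c] <+: PySem.Chars.join [c] ps' := by
              apply (List.prefix_append_right_inj (u ++ [c])).mp
              have heq : u ++ [c] ++ (t₀ ++ [c]) = s ++ [c] := by rw [hs]; simp
              rw [heq]
              exact h
            obtain ⟨j, hj1, hj2, hj3⟩ := (ihs t₀).mpr htpre
            refine ⟨j + 1, by omega, by simp; omega, ?_⟩
            have htkne : ps'.take j ≠ [] := by
              intro hnil
              rcases List.take_eq_nil_iff.mp hnil with h | h
              · omega
              · exact hps' h
            rw [List.take_succ_cons, pvJoin_cons c u _ htkne, ← hj3, hs]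
            simp

theorem pvParts_map (q : String) : (pvPartsA q).map String.toList = pvSp '/' q.toList := by
  have hb := PySem.Str.split?_map q "/"
  rw [show ("/" : String).toList = ['/'] from rfl] at hb
  simp only [PySem.Chars.split?, List.isEmpty_cons, pvSplitOn_eq] at hb
  cases h : PySem.Str.split? q "/" with
  | none => rw [h] at hb; simp at hb
  | some l =>
    rw [h] at hb
    simp only [Option.map_some] at hb
    simp only [pvPartsA, h, Option.getD_some]
    exact Option.some.inj hb

theorem pvParts_length (q : String) : (pvPartsA q).length = (pvSp '/' q.toList).length := by
  rw [← pvParts_map q, List.length_map]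

-- A's dir_set membership, characterised
theorem pvMemDirSet (paths : List String) (s : String) :
    (s ∈ paths.foldl (fun ds path =>
        (PySem.List.pyRange 1 ((pvPartsA path).length : Int) 1).foldl
          (fun ds i => PySem.Set.add ds (PySem.Str.join "/" (PySem.List.slice (pvPartsA path) none (some i)))) ds)
        PySem.Set.empty)
      ↔ ∃ q ∈ paths, (s.toList ++ ['/']) <+: q.toList := by
  have hgen : ∀ (l : List String) (ds : PySem.Set String),
      (s ∈ l.foldl (fun ds path =>
        (PySem.List.pyRange 1 ((pvPartsA path).length : Int) 1).foldl
          (fun ds i => PySem.Set.add ds (PySem.Str.join "/" (PySem.List.slice (pvPartsA path) none (some i)))) ds) ds)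
      ↔ s ∈ ds ∨ ∃ q ∈ l, ∃ i ∈ PySem.List.pyRange 1 ((pvPartsA q).length : Int) 1,
          s = PySem.Str.join "/" (PySem.List.slice (pvPartsA q) none (some i)) := by
    intro l
    induction l with
    | nil => simp
    | cons q l ih =>
      intro ds
      rw [List.foldl_cons, ih, PySem.Set.mem_foldl_add]
      simp only [List.mem_cons, exists_eq_or_imp]
      constructor
      · rintro ((h | h) | h)
        · exact Or.inl h
        · exact Or.inr (Or.inl h)
        · exact Or.inr (Or.inr h)
      · rintro (h | h | h)
        · exact Or.inl (Or.inl h)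
        · exact Or.inl (Or.inr h)
        · exact Or.inr h
  rw [hgen paths PySem.Set.empty]
  simp only [show (PySem.Set.empty : PySem.Set String) = [] from rfl, List.not_mem_nil, false_or]
  apply exists_congr; intro q
  apply and_congr_right; intro _
  -- per-path: join-of-prefix forms ↔ directory-prefix
  have hmain := pvMain '/' (pvSp '/' q.toList) (pvSp_ne_nil _ _) (pvSp_not_mem '/' q.toList) s.toList
  rw [pvSp_join] at hmain
  rw [← hmain]
  constructor
  · rintro ⟨i, hi, rfl⟩
    obtain ⟨h1, h2⟩ := PySem.List.mem_pyRange_one.mp hi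
    refine ⟨i.toNat, by omega, by rw [← pvParts_length]; omega, ?_⟩
    rw [PySem.Str.toList_join, PySem.List.slice_to _ (by omega), List.map_take, pvParts_map q]
    rfl
  · rintro ⟨n, hn1, hn2, hs⟩
    rw [← pvParts_length] at hn2
    refine ⟨(n : Int), PySem.List.mem_pyRange_one.mpr ⟨by omega, by omega⟩, ?_⟩
    apply String.toList_inj.mp
    rw [PySem.Str.toList_join, PySem.List.slice_to _ (by omega), List.map_take, pvParts_map q]
    simpa using hs

theorem remove_folders_spec' (paths : List String) :
    remove_folders paths = remove_folders_alt paths := by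
  unfold remove_folders remove_folders_alt
  rw [PySem.List.foldl_append_if_eq_filter]
  rw [List.nil_append]
  apply List.filter_congr
  intro p _
  have hmem := pvMemDirSet paths p
  have hcontains : PySem.Set.contains
      (paths.foldl (fun ds path =>
        (PySem.List.pyRange 1 ((pvPartsA path).length : Int) 1).foldl
          (fun ds i => PySem.Set.add ds (PySem.Str.join "/" (PySem.List.slice (pvPartsA path) none (some i)))) ds)
        PySem.Set.empty) p
      = paths.any (fun q => PySem.Str.startswith q (p ++ "/")) := by
    rw [Bool.eq_iff_iff, PySem.Set.contains_iff, hmem, List.any_eq_true]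
    apply exists_congr; intro q
    apply and_congr_right; intro _
    rw [PySem.Str.startswith_eq, PySem.Chars.startswith_iff, String.toList_append]
    rfl
  rw [hcontains, Bool.and_comm]

-- ===== VERDICT (by name: the statement is the Claim_ definition above) =====
theorem remove_folders_spec : Claim_equal_remove_folders := by
  intro paths _
  unfold Spec_remove_folders
  exact remove_folders_spec' paths
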